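-- pv_equiv track=rewrite | github.com/august-hw2/24_Programmers_Python | 프로그래머스/2/131127. 할인 행사/할인 행사.py | solution
-- ===== SOURCE A (Python) =====
-- from collections import Counter
--
-- def solution(want, number, discount):
--     answer = 0
--
--     # zip 함수
--     all_want = {}
--     for w, n in zip(want, number):
--         all_want[w] = n
--
--
--     for i in range(len(discount)-9):
--         tmp = Counter(discount[i:i+10])
--         if tmp == all_want:
--             answer += 1
--
--     return answer
-- ===== SOURCE B (Python) =====
-- def solution(want, number, discount):
--     n = len(discount)
--     if n < 10:
--         return 0
--     wantd = {}
--     for w, q in zip(want, number):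
--         wantd[w] = q
--     cnt = {}
--     diff = len(wantd)  # number of keys on which cnt (empty) and wantd disagree
--
--     def shift(k, d):
--         # change the count of k by d (+1/-1), keeping `diff` = number of keys
--         # on which cnt and wantd disagree as dicts
--         nonlocal diff
--         old = cnt.get(k)
--         tgt = wantd.get(k)
--         if old == tgt:
--             diff += 1
--         new = (0 if old is None else old) + d
--         if new == 0:
--             del cnt[k]
--             newv = None
--         else:
--             cnt[k] = new
--             newv = new
--         if newv == tgt:
--             diff -= 1
--
--     for s in discount[:10]:
--         shift(s, 1)
--     answer = 1 if diff == 0 else 0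
--     for out_item, in_item in zip(discount, discount[10:]):
--         shift(out_item, -1)
--         shift(in_item, 1)
--         if diff == 0:
--             answer += 1
--     return answer
-- ===== Notes on version B (the rewrite author's own statement) =====
-- stated objective: faster
-- what changed: Instead of rebuilding a Counter of each 10-element window and comparing the whole dict against the wanted map, B slides a single counter across the list (two key updates per step) and maintains an integer count of keys currently disagreeing with the wanted map, so each window test is O(1).
import Mathlib
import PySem

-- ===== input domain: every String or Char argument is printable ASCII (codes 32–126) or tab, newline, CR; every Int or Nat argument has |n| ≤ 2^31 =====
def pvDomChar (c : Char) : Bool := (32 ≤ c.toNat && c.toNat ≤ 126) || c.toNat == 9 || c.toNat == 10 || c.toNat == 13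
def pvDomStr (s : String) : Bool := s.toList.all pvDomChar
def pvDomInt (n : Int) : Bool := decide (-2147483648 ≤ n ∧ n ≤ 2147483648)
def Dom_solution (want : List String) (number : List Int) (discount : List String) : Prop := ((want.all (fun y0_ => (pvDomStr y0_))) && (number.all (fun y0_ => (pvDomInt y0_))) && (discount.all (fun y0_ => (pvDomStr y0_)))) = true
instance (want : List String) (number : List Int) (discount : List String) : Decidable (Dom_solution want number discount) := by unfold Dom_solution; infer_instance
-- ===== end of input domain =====

-- B replaces A's per-window Counter rebuild + full dict comparison by a single sliding-window
-- counter with an incrementally maintained count of mismatching keys (same return value).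

-- ===== PORT A =====
-- Python's dict `==` (order-insensitive: same key set and same value at every key)
def pyDictEq (d1 d2 : PySem.Dict String Int) : Bool :=
  PySem.Set.equal d1.keys d2.keys && d1.keys.all (fun k => d1.get? k == d2.get? k)

def solution (want : List String) (number : List Int) (discount : List String) : Int :=
  -- all_want built by the zip loop
  let all_want := (want.zip number).foldl (fun d p => d.insert p.1 p.2) PySem.Dict.empty
  -- for i in range(len(discount)-9): tmp = Counter(discount[i:i+10]); if tmp == all_want: answer += 1
  (PySem.List.pyRange 0 ((discount.length : Int) - 9)).foldl
    (fun answer i =>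
      let tmp := PySem.Dict.counter (PySem.List.slice discount (some i) (some (i + 10)))
      if pyDictEq tmp all_want then answer + 1 else answer) 0

-- ===== PORT B =====
-- Source B's `shift(k, d)`: change cnt[k] by d, maintaining diff = number of keys on which
-- cnt and wantd disagree as dicts; returns the new (cnt, diff).
def shiftAlt (wantd : PySem.Dict String Int) (cnt : PySem.Dict String Int) (diff : Int)
    (k : String) (d : Int) : PySem.Dict String Int × Int :=
  let old := cnt.get? k
  let tgt := wantd.get? k
  let diff1 := if old == tgt then diff + 1 else diff
  let nw := (match old with | none => (0 : Int) | some v => v) + d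
  if nw == 0 then
    (cnt.erase k, if (none : Option Int) == tgt then diff1 - 1 else diff1)
  else
    (cnt.insert k nw, if (some nw : Option Int) == tgt then diff1 - 1 else diff1)

-- body of `for s in discount[:10]: shift(s, 1)`
def initStepAlt (wantd : PySem.Dict String Int) (st : PySem.Dict String Int × Int)
    (s : String) : PySem.Dict String Int × Int :=
  shiftAlt wantd st.1 st.2 s 1

-- body of `for out_item, in_item in zip(discount, discount[10:]): …`
def slideStepAlt (wantd : PySem.Dict String Int) (st : (PySem.Dict String Int × Int) × Int)
    (p : String × String) : (PySem.Dict String Int × Int) × Int :=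
  let a := shiftAlt wantd st.1.1 st.1.2 p.1 (-1)
  let b := shiftAlt wantd a.1 a.2 p.2 1
  (b, if b.2 == 0 then st.2 + 1 else st.2)

def solution_alt (want : List String) (number : List Int) (discount : List String) : Int :=
  if discount.length < 10 then 0
  else
    let wantd := (want.zip number).foldl (fun d p => d.insert p.1 p.2) PySem.Dict.empty
    let st1 := (discount.take 10).foldl (initStepAlt wantd) (PySem.Dict.empty, (wantd.size : Int))
    let answer0 : Int := if st1.2 == 0 then 1 else 0
    let st2 := (discount.zip (discount.drop 10)).foldl (slideStepAlt wantd) (st1, answer0)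
    st2.2

-- ===== PRECONDITION & SPEC =====
def Spec_solution (want : List String) (number : List Int) (discount : List String) (out : Int) : Prop := out = solution_alt want number discount
instance (want : List String) (number : List Int) (discount : List String) (out : Int) : Decidable (Spec_solution want number discount out) := by unfold Spec_solution; infer_instance

-- ===== CLAIM (what is proved, stated in full; the proofs are below) =====
def Claim_equal_solution : Prop := ∀ (want : List String) (number : List Int) (discount : List String), Dom_solution want number discount → Spec_solution want number discount (solution want number discount)

-- ===== LEMMAS AND PROOFS =====

-- cnt stores exactly the positive counts: encC m is what cnt.get? must return for true count m
def encC (m : Nat) : Option Int := if m = 0 then none else some (m : Int)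

-- "cnt and wantd disagree at key k" when the window counts are given by c
def mismB (wantd : PySem.Dict String Int) (c : String → Nat) (k : String) : Bool :=
  !(encC (c k) == wantd.get? k)

-- number of disagreeing keys over the fixed key universe K
def DcN (K : List String) (wantd : PySem.Dict String Int) (c : String → Nat) : Nat :=
  (K.filter (mismB wantd c)).length

def InvC (c : String → Nat) (cnt : PySem.Dict String Int) : Prop :=
  ∀ k, cnt.get? k = encC (c k)

-- window with start s, and its count function
def winC (discount : List String) (s : Nat) : List String := (discount.drop s).take 10
def wcC (discount : List String) (s : Nat) (k : String) : Nat := (winC discount s).count k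

-- number of matched windows among starts 0 … m (inclusive)
def AnsC (K : List String) (wantd : PySem.Dict String Int) (discount : List String) (m : Nat) : Int :=
  (((List.range (m + 1)).filter (fun s => DcN K wantd (wcC discount s) = 0)).length : Int)

theorem find?_filter_key (k k' : String) (h : ¬ k' = k) (t : List (String × Int)) :
    (t.filter (fun p => !(p.1 == k))).find? (fun p => p.1 == k')
      = t.find? (fun p => p.1 == k') := by
  induction t with
  | nil => rfl
  | cons p t ih =>
    rw [List.filter_cons]
    by_cases hp : (p.1 == k) = true
    · have hp' : (p.1 == k') = false := by
        rw [beq_iff_eq] at hp; subst hp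
        simpa [beq_iff_eq] using fun hh => h hh.symm
      rw [if_neg (by simp [hp]), List.find?_cons_of_neg (by simp [hp']), ih]
    · have hp2 : (!(p.1 == k)) = true := by simp_all
      rw [if_pos hp2]
      by_cases hk' : (p.1 == k') = true
      · rw [List.find?_cons_of_pos (by exact hk'), List.find?_cons_of_pos (by exact hk')]
      · rw [List.find?_cons_of_neg (by simp_all), List.find?_cons_of_neg (by simp_all), ih]

theorem get?_erase_dict (d : PySem.Dict String Int) (k k' : String) :
    (d.erase k).get? k' = if k' = k then none else d.get? k' := by
  obtain ⟨items⟩ := d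
  simp only [PySem.Dict.erase, PySem.Dict.get?]
  split
  · next heq =>
    subst heq
    rw [List.find?_eq_none.mpr]
    · rfl
    · intro p hp
      simp only [List.mem_filter] at hp
      simpa using hp.2
  · next hne =>
    rw [find?_filter_key k k' hne]


theorem filter_update_len (K : List String) (hK : K.Nodup) (k0 : String) (hk : k0 ∈ K)
    (f g : String → Bool) (h : ∀ k, k ≠ k0 → f k = g k) :
    ((K.filter g).length : Int)
      = (K.filter f).length + (if g k0 then 1 else 0) - (if f k0 then 1 else 0) := by
  obtain ⟨as, bs, rfl⟩ := List.append_of_mem hk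
  simp only [List.nodup_append, List.nodup_cons] at hK
  have h1 : k0 ∉ as := fun hmem => (hK.2.2 _ hmem) k0 (by simp) rfl
  have h2 : k0 ∉ bs := hK.2.1.1
  have has : as.filter g = as.filter f :=
    List.filter_congr (fun x hx => (h x (fun he => h1 (he ▸ hx))).symm)
  have hbs : bs.filter g = bs.filter f :=
    List.filter_congr (fun x hx => (h x (fun he => h2 (he ▸ hx))).symm)
  rw [List.filter_append, List.filter_append, List.filter_cons, List.filter_cons, has, hbs]
  by_cases hg : g k0 <;> by_cases hf : f k0 <;>
    simp [hg, hf, List.length_append] <;> omega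

theorem foldl_count_pyRange (g : Int → Bool) (M : Nat) :
    ∀ (a : Int), (PySem.List.pyRange 0 (M : Int)).foldl (fun acc i => if g i then acc + 1 else acc) a
      = a + (((List.range M).filter (fun s : Nat => g (s : Int))).length : Int) := by
  induction M with
  | zero => intro a; simp [PySem.List.pyRange]
  | succ M ih =>
    intro a
    have hcast : ((M + 1 : Nat) : Int) = (M : Int) + 1 := by push_cast; ring
    rw [hcast, PySem.List.pyRange_one_append 0 (M : Int) ((M : Int) + 1) (by omega) (by omega)]
    rw [List.foldl_append, ih]
    have hone : PySem.List.pyRange (M : Int) ((M : Int) + 1) = [(M : Int)] := by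
      rw [PySem.List.pyRange_one_cons (by omega)]
      simp [PySem.List.pyRange]
    rw [hone, List.range_succ, List.filter_append]
    simp only [List.foldl_cons, List.foldl_nil, List.filter_cons, List.filter_nil]
    by_cases hg : g (M : Int) <;> simp [hg, List.length_append] <;> push_cast <;> omega

theorem get?_counter (W : List String) (k : String) :
    (PySem.Dict.counter W).get? k = encC (W.count k) := by
  have hc := PySem.Dict.contains_counter W k
  have hg := PySem.Dict.getD_counter W k
  by_cases h : W.count k = 0
  · have hnm : k ∉ W := List.count_eq_zero.mp h
    have hcf : (PySem.Dict.counter W).contains k = false := by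
      rw [hc]; simpa using hnm
    rw [(PySem.Dict.get?_eq_none_iff_contains _ _).mpr hcf]
    simp [encC, h]
  · have hmem : k ∈ W := by
      by_contra hm
      exact h (List.count_eq_zero.mpr hm)
    have hcon : (PySem.Dict.counter W).contains k = true := by
      rw [hc]; simpa using hmem
    rcases ho : (PySem.Dict.counter W).get? k with _ | v
    · rw [PySem.Dict.get?_eq_none_iff_contains] at ho
      rw [ho] at hcon; exact absurd hcon (by simp)
    · rw [PySem.Dict.getD_eq_get?_getD, ho] at hg
      simp at hg
      simp [encC, h, hg]

theorem pyRange_nil (M : Int) (h : M ≤ 0) : PySem.List.pyRange 0 M = [] := by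
  simp [PySem.List.pyRange]
  omega

theorem shift_spec (K : List String) (hK : K.Nodup) (wantd : PySem.Dict String Int)
    (c : String → Nat) (cnt : PySem.Dict String Int) (diff : Int) (k0 : String) (hk0 : k0 ∈ K)
    (d : Int) (hd : d = 1 ∨ (d = -1 ∧ 1 ≤ c k0))
    (hinv : InvC c cnt) (hdiff : diff = (DcN K wantd c : Int)) :
    InvC (fun k => if k = k0 then ((c k0 : Int) + d).toNat else c k) (shiftAlt wantd cnt diff k0 d).1
      ∧ (shiftAlt wantd cnt diff k0 d).2
          = (DcN K wantd (fun k => if k = k0 then ((c k0 : Int) + d).toNat else c k) : Int) := by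
  set c' : String → Nat := fun k => if k = k0 then ((c k0 : Int) + d).toNat else c k with hc'
  have hE : (match encC (c k0) with | none => (0 : Int) | some v => v) = (c k0 : Int) := by
    unfold encC; split_ifs with h0 <;> simp [h0]
  have hnw : (((c k0 : Int) + d).toNat : Int) = (c k0 : Int) + d := by
    rcases hd with rfl | ⟨rfl, hge⟩ <;> omega
  have hcnt' : ∀ k, k ≠ k0 → c' k = c k := by intro k hk; simp [hc', hk]
  have hmism : ∀ k, k ≠ k0 → mismB wantd c k = mismB wantd c' k := by
    intro k hk; simp [mismB, hcnt' k hk]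
  have hlen : ((DcN K wantd c' : Nat) : Int)
      = (DcN K wantd c : Int) + (if mismB wantd c' k0 then 1 else 0)
        - (if mismB wantd c k0 then 1 else 0) := by
    exact filter_update_len K hK k0 hk0 _ _ hmism
  have henc' : encC (c' k0) = if ((c k0 : Int) + d) = 0 then none else some ((c k0 : Int) + d) := by
    simp only [hc', if_pos rfl, encC]
    by_cases h0 : ((c k0 : Int) + d) = 0
    · rw [if_pos h0, if_pos (by omega)]
    · rw [if_neg (by omega : ¬ ((c k0 : Int) + d).toNat = 0), if_neg h0, hnw]
  simp only [shiftAlt]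
  rw [hinv k0, hE]
  by_cases hz : ((c k0 : Int) + d) == 0
  · rw [if_pos hz]
    have hz' : ((c k0 : Int) + d) = 0 := by simpa using hz
    constructor
    · intro k
      rw [get?_erase_dict]
      by_cases hk : k = k0
      · subst hk; rw [if_pos rfl, henc', if_pos hz']
      · rw [if_neg hk, hinv k, hcnt' k hk]
    · rw [hlen, hdiff]
      have hg : mismB wantd c' k0 = !((none : Option Int) == wantd.get? k0) := by
        rw [mismB, henc', if_pos hz']
      rw [hg]
      by_cases h1 : (encC (c k0) == wantd.get? k0) = true <;>
        by_cases h2 : ((none : Option Int) == wantd.get? k0) = true <;>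
          simp [h1, h2, mismB] <;> omega
  · rw [if_neg (by simpa using hz)]
    have hz' : ((c k0 : Int) + d) ≠ 0 := by simpa using hz
    constructor
    · intro k
      rw [PySem.Dict.get?_insert]
      by_cases hk : k = k0
      · subst hk; rw [if_pos rfl, henc', if_neg hz']
      · rw [if_neg hk, hinv k, hcnt' k hk]
    · rw [hlen, hdiff]
      have hg : mismB wantd c' k0 = !((some ((c k0 : Int) + d) : Option Int) == wantd.get? k0) := by
        rw [mismB, henc', if_neg hz']
      rw [hg]
      by_cases h1 : (encC (c k0) == wantd.get? k0) = true <;>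
        by_cases h2 : ((some ((c k0 : Int) + d) : Option Int) == wantd.get? k0) = true <;>
          simp [h1, h2, mismB] <;> omega

theorem DcN_congr (K : List String) (wantd : PySem.Dict String Int) (c c' : String → Nat)
    (h : ∀ k, c k = c' k) : DcN K wantd c = DcN K wantd c' := by
  rw [DcN, DcN, funext h]

theorem InvC_congr (c c' : String → Nat) (cnt : PySem.Dict String Int)
    (h : ∀ k, c k = c' k) (hi : InvC c cnt) : InvC c' cnt := by
  intro k; rw [hi k, funext h]

theorem foldl_init_spec (K : List String) (hK : K.Nodup) (wantd : PySem.Dict String Int)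
    (p : List String) :
    ∀ (c : String → Nat) (cnt : PySem.Dict String Int) (diff : Int),
      (∀ x ∈ p, x ∈ K) → InvC c cnt → diff = (DcN K wantd c : Int) →
      InvC (fun k => c k + p.count k) (p.foldl (initStepAlt wantd) (cnt, diff)).1
        ∧ (p.foldl (initStepAlt wantd) (cnt, diff)).2
            = (DcN K wantd (fun k => c k + p.count k) : Int) := by
  induction p with
  | nil =>
    intro c cnt diff _ hinv hdiff
    constructor
    · exact InvC_congr c _ cnt (fun k => by simp) hinv
    · simpa using hdiff ▸ congrArg (fun n : Nat => (n : Int))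
        (DcN_congr K wantd c _ (fun k => by simp))
  | cons x t ih =>
    intro c cnt diff hmem hinv hdiff
    have hx : x ∈ K := hmem x List.mem_cons_self
    have hs := shift_spec K hK wantd c cnt diff x hx 1 (Or.inl rfl) hinv hdiff
    simp only [List.foldl_cons]
    have heq : ∀ k, (if k = x then ((c x : Int) + 1).toNat else c k) + t.count k
        = c k + (x :: t).count k := by
      intro k
      rw [List.count_cons]
      by_cases hk : k = x
      · subst hk; simp; omega
      · have : (x == k) = false := by simpa using fun h => hk h.symm
        simp [hk, this]
    have := ih _ _ _ (fun y hy => hmem y (List.mem_cons_of_mem _ hy)) hs.1 hs.2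
    rw [initStepAlt]
    constructor
    · exact InvC_congr _ _ _ heq this.1
    · rw [this.2]
      exact congrArg (fun n : Nat => (n : Int)) (DcN_congr K wantd _ _ heq)

theorem win_cons (discount : List String) (s : Nat) (h : s + 10 ≤ discount.length) :
    winC discount s
      = discount[s]'(by omega) :: ((discount.drop (s + 1)).take 9) := by
  rw [winC, List.drop_eq_getElem_cons (by omega)]
  rfl

theorem win_snoc (discount : List String) (s : Nat) (h : s + 11 ≤ discount.length) :
    winC discount (s + 1)
      = ((discount.drop (s + 1)).take 9) ++ [discount[s + 10]'(by omega)] := by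
  rw [winC]
  have ht : List.take 10 (discount.drop (s + 1))
      = List.take 9 (discount.drop (s + 1)) ++ ((discount.drop (s + 1))[9]?).toList :=
    List.take_succ
  rw [ht, List.getElem?_drop, List.getElem?_eq_getElem (by omega)]
  have h9 : s + 1 + 9 = s + 10 := by omega
  simp [h9]

theorem slide_spec (K : List String) (hK : K.Nodup) (wantd : PySem.Dict String Int)
    (discount : List String) (hsub : ∀ x ∈ discount, x ∈ K)
    (s : Nat) (h : s + 11 ≤ discount.length)
    (cnt : PySem.Dict String Int) (diff : Int)
    (hinv : InvC (wcC discount s) cnt) (hdiff : diff = (DcN K wantd (wcC discount s) : Int)) :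
    InvC (wcC discount (s + 1))
        (shiftAlt wantd (shiftAlt wantd cnt diff (discount[s]'(by omega)) (-1)).1
          (shiftAlt wantd cnt diff (discount[s]'(by omega)) (-1)).2 (discount[s + 10]'(by omega)) 1).1
      ∧ (shiftAlt wantd (shiftAlt wantd cnt diff (discount[s]'(by omega)) (-1)).1
          (shiftAlt wantd cnt diff (discount[s]'(by omega)) (-1)).2 (discount[s + 10]'(by omega)) 1).2
          = (DcN K wantd (wcC discount (s + 1)) : Int) := by
  have hsl : s < discount.length := by omega
  have hsl10 : s + 10 < discount.length := by omega
  obtain ⟨a, ha⟩ : ∃ x, discount[s]'hsl = x := ⟨_, rfl⟩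
  obtain ⟨b, hb⟩ : ∃ x, discount[s + 10]'hsl10 = x := ⟨_, rfl⟩
  rw [ha, hb]
  have hmema : a ∈ K := hsub a (ha ▸ List.getElem_mem _)
  have hmemb : b ∈ K := hsub b (hb ▸ List.getElem_mem _)
  have hw1 : ∀ k, wcC discount s k
      = ((discount.drop (s + 1)).take 9).count k + (if a = k then 1 else 0) := by
    intro k
    rw [wcC, win_cons discount s (by omega), List.count_cons, ha]
    simp [beq_iff_eq]
  have hcge : 1 ≤ wcC discount s a := by rw [hw1 a]; simp
  have h1 := shift_spec K hK wantd (wcC discount s) cnt diff a hmema (-1)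
    (Or.inr ⟨rfl, hcge⟩) hinv hdiff
  have hmid_eq : ∀ k, (if k = a then ((wcC discount s a : Int) + (-1)).toNat
      else wcC discount s k) = ((discount.drop (s + 1)).take 9).count k := by
    intro k
    by_cases hk : k = a
    · rw [if_pos hk, hk, hw1 a, if_pos rfl]
      omega
    · rw [if_neg hk, hw1 k, if_neg (fun hh => hk hh.symm)]
      omega
  have h1i : InvC (fun k => ((discount.drop (s + 1)).take 9).count k)
      (shiftAlt wantd cnt diff a (-1)).1 :=
    InvC_congr _ _ _ hmid_eq h1.1
  have h1d : (shiftAlt wantd cnt diff a (-1)).2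
      = (DcN K wantd (fun k => ((discount.drop (s + 1)).take 9).count k) : Int) := by
    rw [h1.2]
    exact congrArg (fun n : Nat => (n : Int)) (DcN_congr K wantd _ _ hmid_eq)
  have h2 := shift_spec K hK wantd _ (shiftAlt wantd cnt diff a (-1)).1
    (shiftAlt wantd cnt diff a (-1)).2 b hmemb 1 (Or.inl rfl) h1i h1d
  have hw2 : ∀ k, (if k = b
        then ((((discount.drop (s + 1)).take 9).count b : Int) + 1).toNat
        else ((discount.drop (s + 1)).take 9).count k)
      = wcC discount (s + 1) k := by
    intro k
    rw [wcC, win_snoc discount s (by omega), List.count_append, hb]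
    by_cases hk : k = b
    · rw [if_pos hk, hk]
      simp [beq_iff_eq]
    · rw [if_neg hk]
      have hbf : (b == k) = false := by simpa using fun hh => hk hh.symm
      simp [List.count_singleton, hbf]
  exact ⟨InvC_congr _ _ _ hw2 h2.1,
    by rw [h2.2]; exact congrArg (fun n : Nat => (n : Int)) (DcN_congr K wantd _ _ hw2)⟩

theorem AnsC_succ (K : List String) (wantd : PySem.Dict String Int) (discount : List String)
    (m : Nat) :
    AnsC K wantd discount (m + 1)
      = AnsC K wantd discount m
        + (if DcN K wantd (wcC discount (m + 1)) = 0 then 1 else 0) := by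
  simp only [AnsC]
  rw [List.range_succ, List.filter_append]
  by_cases h0 : DcN K wantd (wcC discount (m + 1)) = 0
  · simp [h0, List.filter]
  · simp [h0, List.filter]

theorem slide_loop_spec (K : List String) (hK : K.Nodup) (wantd : PySem.Dict String Int)
    (discount : List String) (hsub : ∀ x ∈ discount, x ∈ K) (hn : 10 ≤ discount.length)
    (st1 : PySem.Dict String Int × Int)
    (hinv : InvC (wcC discount 0) st1.1) (hdiff : st1.2 = (DcN K wantd (wcC discount 0) : Int)) :
    ∀ (m : Nat), m ≤ discount.length - 10 →
      InvC (wcC discount m)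
          (((discount.zip (discount.drop 10)).take m).foldl (slideStepAlt wantd)
            (st1, if st1.2 == 0 then 1 else 0)).1.1
        ∧ (((discount.zip (discount.drop 10)).take m).foldl (slideStepAlt wantd)
            (st1, if st1.2 == 0 then 1 else 0)).1.2 = (DcN K wantd (wcC discount m) : Int)
        ∧ (((discount.zip (discount.drop 10)).take m).foldl (slideStepAlt wantd)
            (st1, if st1.2 == 0 then 1 else 0)).2 = AnsC K wantd discount m := by
  intro m
  induction m with
  | zero =>
    intro _
    refine ⟨by simpa using hinv, by simpa using hdiff, ?_⟩
    simp only [List.take_zero, List.foldl_nil, AnsC]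
    rw [hdiff]
    rcases Nat.eq_zero_or_pos (DcN K wantd (wcC discount 0)) with h0 | h0
    · simp [h0, List.filter]
    · have hne : ¬ (DcN K wantd (wcC discount 0) = 0) := by omega
      simp [hne, List.filter]
  | succ m ih =>
    intro hm
    have hm' : m ≤ discount.length - 10 := by omega
    have hlen : (discount.zip (discount.drop 10)).length = discount.length - 10 := by
      simp [List.length_zip]
    have hml : m < (discount.zip (discount.drop 10)).length := by omega
    have hm11 : m + 11 ≤ discount.length := by omega
    have htake : (discount.zip (discount.drop 10)).take (m + 1)
        = (discount.zip (discount.drop 10)).take m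
            ++ [(discount[m]'(by omega), discount[m + 10]'(by omega))] := by
      have := @List.take_succ _ (discount.zip (discount.drop 10)) m
      rw [this, List.getElem?_eq_getElem hml]
      have hz : (discount.zip (discount.drop 10))[m]'hml
          = (discount[m]'(by omega), (discount.drop 10)[m]'(by simp; omega)) :=
        List.getElem_zip
      rw [hz]
      have hd : (discount.drop 10)[m]'(by simp; omega) = discount[10 + m]'(by omega) :=
        List.getElem_drop
      have hd2 : discount[10 + m]'(by omega) = discount[m + 10]'(by omega) :=
        getElem_congr rfl (by omega) (by omega)
      rw [hd, hd2]
      rfl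
    obtain ⟨hi1, hi2, hi3⟩ := ih hm'
    rw [htake, List.foldl_append]
    have hs := slide_spec K hK wantd discount hsub m hm11 _ _ hi1 hi2
    simp only [List.foldl_cons, List.foldl_nil, slideStepAlt]
    refine ⟨hs.1, hs.2, ?_⟩
    rw [hs.2, hi3, AnsC_succ]
    by_cases h0 : DcN K wantd (wcC discount (m + 1)) = 0
    · simp [h0]
    · simp [h0]

theorem DcN_zero_iff (K : List String) (wantd : PySem.Dict String Int) (c : String → Nat) :
    DcN K wantd c = 0 ↔ ∀ k ∈ K, encC (c k) = wantd.get? k := by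
  rw [DcN, List.length_eq_zero_iff, List.filter_eq_nil_iff]
  constructor
  · intro h k hk
    have := h k hk
    simpa [mismB] using this
  · intro h k hk
    simp [mismB, h k hk]

theorem pyDictEq_iff (K : List String) (wantd : PySem.Dict String Int) (W : List String)
    (hW : ∀ x ∈ W, x ∈ K) (hwk : ∀ k ∈ wantd.keys, k ∈ K) :
    pyDictEq (PySem.Dict.counter W) wantd = true ↔ DcN K wantd (fun k => W.count k) = 0 := by
  rw [DcN_zero_iff]
  constructor
  · intro h k hk
    rw [pyDictEq, Bool.and_eq_true, List.all_eq_true] at h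
    obtain ⟨hkeys, hall⟩ := h
    by_cases hmem : k ∈ (PySem.Dict.counter W).keys
    · have := hall k hmem
      rw [← get?_counter]
      simpa using this
    · have h1 : (PySem.Dict.counter W).get? k = none :=
        (PySem.Dict.get?_eq_none_iff_not_mem_keys _ _).mpr hmem
      have hkeq : ∀ x, x ∈ (PySem.Dict.counter W).keys ↔ x ∈ wantd.keys := by
        intro x
        rw [PySem.Set.equal, Bool.and_eq_true, PySem.Set.issubset, PySem.Set.issubset,
          List.all_eq_true, List.all_eq_true] at hkeys
        constructor
        · intro hx; simpa using hkeys.1 x hx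
        · intro hx; simpa using hkeys.2 x hx
      have h2 : wantd.get? k = none :=
        (PySem.Dict.get?_eq_none_iff_not_mem_keys _ _).mpr (fun hc => hmem ((hkeq k).mpr hc))
      rw [← get?_counter, h1, h2]
  · intro h
    have hget : ∀ k, (PySem.Dict.counter W).get? k = wantd.get? k := by
      intro k
      by_cases hk : k ∈ K
      · rw [get?_counter]; exact h k hk
      · rw [(PySem.Dict.get?_eq_none_iff_not_mem_keys _ _).mpr, 
            (PySem.Dict.get?_eq_none_iff_not_mem_keys _ _).mpr]
        · exact fun hc => hk (hwk k hc)
        · rw [PySem.Dict.keys_counter]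
          rw [PySem.Set.mem_ofList]
          exact fun hc => hk (hW k hc)
    have hmemiff : ∀ x, x ∈ (PySem.Dict.counter W).keys ↔ x ∈ wantd.keys := by
      intro x
      constructor
      · intro hx
        by_contra hc
        have := (PySem.Dict.get?_eq_none_iff_not_mem_keys wantd x).mpr hc
        rw [← hget x] at this
        exact ((PySem.Dict.get?_eq_none_iff_not_mem_keys _ x).mp this) hx
      · intro hx
        by_contra hc
        have := (PySem.Dict.get?_eq_none_iff_not_mem_keys _ x).mpr hc
        rw [hget x] at this
        exact ((PySem.Dict.get?_eq_none_iff_not_mem_keys _ x).mp this) hx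
    rw [pyDictEq, Bool.and_eq_true, List.all_eq_true]
    constructor
    · rw [PySem.Set.equal, Bool.and_eq_true, PySem.Set.issubset, PySem.Set.issubset,
        List.all_eq_true, List.all_eq_true]
      constructor
      · intro x hx; simpa using (hmemiff x).mp hx
      · intro x hx; simpa using (hmemiff x).mpr hx
    · intro k _
      simp [hget k]

theorem size_eq_DcN_zero (K : List String) (hK : K.Nodup) (wantd : PySem.Dict String Int)
    (hwnd : wantd.keys.Nodup) (hwk : ∀ k ∈ wantd.keys, k ∈ K) :
    (wantd.size : Int) = (DcN K wantd (fun _ => 0) : Int) := by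
  have hfil : K.filter (mismB wantd (fun _ => 0)) = K.filter (fun k => decide (k ∈ wantd.keys)) := by
    apply List.filter_congr
    intro x _
    by_cases hx : x ∈ wantd.keys
    · rcases ho : wantd.get? x with _ | v
      · exact absurd ((PySem.Dict.get?_eq_none_iff_not_mem_keys _ _).mp ho) (by simpa using hx)
      · simp [mismB, encC, ho, hx]
    · have := (PySem.Dict.get?_eq_none_iff_not_mem_keys _ _).mpr hx
      simp [mismB, encC, this, hx]
  have hperm : (K.filter (fun k => decide (k ∈ wantd.keys))).Perm wantd.keys := by
    rw [List.perm_ext_iff_of_nodup (hK.filter _) hwnd]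
    intro a
    simp only [List.mem_filter, decide_eq_true_eq]
    exact ⟨fun h => h.2, fun h => ⟨hwk a h, h⟩⟩
  have hsz : wantd.size = wantd.keys.length := by
    rw [PySem.Dict.size, PySem.Dict.keys, List.length_map]
  rw [DcN, hfil, hperm.length_eq, hsz]

theorem main_equiv (want : List String) (number : List Int) (discount : List String) :
    solution want number discount = solution_alt want number discount := by
  by_cases hlen : discount.length < 10
  · simp only [solution, solution_alt]
    rw [if_pos hlen, pyRange_nil ((discount.length : Int) - 9) (by push_cast; omega)]
    rfl
  · have hge : 10 ≤ discount.length := by omega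
    simp only [solution, solution_alt]
    rw [if_neg hlen]
    set wantd := (want.zip number).foldl (fun d p => d.insert p.1 p.2) PySem.Dict.empty with hwd
    set K : List String := PySem.Set.ofList (want ++ discount) with hKdef
    have hK : K.Nodup := PySem.Set.nodup_ofList _
    have hsub : ∀ x ∈ discount, x ∈ K := fun x hx =>
      (PySem.Set.mem_ofList _ x).mpr (List.mem_append.mpr (Or.inr hx))
    have hwnd : wantd.keys.Nodup := by
      rw [hwd]
      exact PySem.Dict.nodup_keys_foldl_insert_key (want.zip number) Prod.fst
        (fun _ p => p.2) PySem.Dict.empty (by rw [PySem.Dict.keys_empty]; exact List.nodup_nil)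
    have hwk : ∀ k ∈ wantd.keys, k ∈ K := by
      intro k hk
      rw [hwd, PySem.Dict.keys_foldl_insert_key (want.zip number) Prod.fst
        (fun _ p => p.2) PySem.Dict.empty] at hk
      rw [PySem.Dict.keys_empty] at hk
      rw [PySem.Set.mem_update] at hk
      rcases hk with hk | hk
      · exact absurd hk (List.not_mem_nil)
      · obtain ⟨p, hp, hpk⟩ := List.mem_map.mp hk
        have := (List.of_mem_zip (a := p.1) (b := p.2) (by simpa using hp)).1
        exact (PySem.Set.mem_ofList _ k).mpr (List.mem_append.mpr (Or.inl (hpk ▸ this)))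
    -- first loop
    have hinit := foldl_init_spec K hK wantd (discount.take 10) (fun _ => 0)
      PySem.Dict.empty (wantd.size : Int)
      (fun x hx => hsub x (List.take_subset 10 discount hx))
      (fun k => by rw [PySem.Dict.get?_empty]; simp [encC])
      (size_eq_DcN_zero K hK wantd hwnd hwk)
    have hc0 : ∀ k, 0 + (discount.take 10).count k = wcC discount 0 k := by
      intro k; simp [wcC, winC]
    have hinv1 : InvC (wcC discount 0)
        ((discount.take 10).foldl (initStepAlt wantd) (PySem.Dict.empty, (wantd.size : Int))).1 :=
      InvC_congr _ _ _ hc0 hinit.1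
    have hd1 : ((discount.take 10).foldl (initStepAlt wantd)
          (PySem.Dict.empty, (wantd.size : Int))).2 = (DcN K wantd (wcC discount 0) : Int) := by
      rw [hinit.2]
      exact congrArg (fun n : Nat => (n : Int)) (DcN_congr K wantd _ _ hc0)
    -- second loop
    have hzlen : (discount.zip (discount.drop 10)).length = discount.length - 10 := by
      simp [List.length_zip]
    have hloop := slide_loop_spec K hK wantd discount hsub hge _ hinv1 hd1
      (discount.length - 10) le_rfl
    rw [show (discount.zip (discount.drop 10)).take (discount.length - 10)
        = discount.zip (discount.drop 10) from List.take_of_length_le (le_of_eq hzlen)] at hloop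
    -- A side
    have hM : ((discount.length : Int) - 9) = ((discount.length - 9 : Nat) : Int) := by
      push_cast; omega
    rw [hM, foldl_count_pyRange _ (discount.length - 9) 0]
    have hfc : (List.range (discount.length - 9)).filter
          (fun s : Nat => pyDictEq (PySem.Dict.counter
            (PySem.List.slice discount (some (s : Int)) (some ((s : Int) + 10)))) wantd)
        = (List.range (discount.length - 9)).filter
            (fun s => DcN K wantd (wcC discount s) = 0) := by
      apply List.filter_congr
      intro s hs
      have hsr : s < discount.length - 9 := List.mem_range.mp hs
      have hslice : PySem.List.slice discount (some (s : Int)) (some ((s : Int) + 10))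
          = winC discount s := by
        have : ((s : Int) + 10) = ((s + 10 : Nat) : Int) := by push_cast; ring
        rw [this, PySem.List.slice_natCast discount s (s + 10)]
        rw [winC]
        congr 1
        omega
      rw [hslice, Bool.eq_iff_iff, decide_eq_true_iff]
      exact pyDictEq_iff K wantd (winC discount s)
        (fun x hx => hsub x (List.drop_subset s discount (List.take_subset 10 _ hx))) hwk
    rw [hfc, hloop.2.2, AnsC]
    have h910 : discount.length - 9 = (discount.length - 10) + 1 := by omega
    rw [h910]
    simp

-- ===== VERDICT (by name: the statement is the Claim_ definition above) =====
theorem solution_spec : Claim_equal_solution := by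
  intro want number discount _
  unfold Spec_solution
  exact main_equiv want number discount
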